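-- pv_equiv track=rewrite | github.com/trykvi/advent-of-code | AoC-2025/day3.py | part2
-- ===== SOURCE A (Python) =====
-- def part2(input):
--     banks = input.split("\n")
--     total_joltage = 0
--
--     for bank in banks:
--         batteries = []
--         prev_battery_idx = -1
--
--         for i in range(12):
--             batteries.append(0)
--             for j in range(prev_battery_idx+1, len(bank)-11+i):
--                 if(int(bank[j]) > batteries[-1]):
--                     batteries[-1] = int(bank[j])
--                     prev_battery_idx = j
--
--         total_joltage += int("".join([str(battery) for battery in batteries]))
--
--     return total_joltage
-- ===== SOURCE B (Python) =====
-- def part2(input):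
--     total = 0
--     for line in input.split("\n"):
--         if not line:
--             continue
--         allowed = len(line) - 12  # digits we may discard; <= 0 means keep the whole line
--         stack = []
--         removed = 0
--         for ch in line:
--             while stack and stack[-1] < ch and removed < allowed:
--                 stack.pop()
--                 removed += 1
--             stack.append(ch)
--         total += int("".join(stack[:12]).zfill(12))
--     return total
-- ===== Notes on version B (the rewrite author's own statement) =====
-- stated objective: faster
-- what changed: Per line, the 12 repeated windowed max-scans with a persistent prev-index are replaced by one forward pass maintaining a monotonic stack with a removal budget of len(line)-12; the first 12 stack entries (zero-filled to 12 digits) give the same maximal 12-digit reading.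
import Mathlib
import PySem

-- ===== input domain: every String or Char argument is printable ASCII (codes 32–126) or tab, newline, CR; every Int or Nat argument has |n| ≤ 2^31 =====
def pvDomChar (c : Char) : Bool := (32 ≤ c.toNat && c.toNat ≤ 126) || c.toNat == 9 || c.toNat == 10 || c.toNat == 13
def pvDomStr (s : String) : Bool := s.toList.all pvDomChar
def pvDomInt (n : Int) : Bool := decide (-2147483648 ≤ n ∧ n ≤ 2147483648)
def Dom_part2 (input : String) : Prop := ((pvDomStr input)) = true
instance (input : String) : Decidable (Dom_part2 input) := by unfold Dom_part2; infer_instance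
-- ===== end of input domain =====

-- B replaces A's twelve repeated windowed max-scans per line by a single monotonic-stack
-- "remove k digits to keep the maximal 12-digit reading" pass (objective: faster, constant factor).


-- ===== PORT A =====
-- int(bank[j]) for one character of the line (IndexError/ValueError never hit inside Pre_)
def dvalA (cs : List Char) (j : Int) : Int :=
  match PySem.List.pyGet? cs j with
  | some c => (PySem.Int.ofChars? [c]).getD 0
  | none => 0

def part2 (input : String) : Int :=
  let banks := (PySem.Str.split? input "\n").getD []
  banks.foldl (fun total bank =>
    let cs := bank.toList
    -- state: (batteries, prev_battery_idx)
    let st :=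
      (PySem.List.pyRange 0 12).foldl (fun (st : List Int × Int) i =>
        (PySem.List.pyRange (st.2 + 1) ((cs.length : Int) - 11 + i)).foldl
          (fun (st2 : List Int × Int) j =>
            if dvalA cs j > (PySem.List.pyGet? st2.1 (-1)).getD 0 then
              (st2.1.dropLast ++ [dvalA cs j], j)
            else st2)
          (st.1 ++ [0], st.2)) ([], -1)
    total + (PySem.Int.ofChars? (PySem.Chars.join [] (st.1.map PySem.Int.toChars))).getD 0) 0

-- ===== PORT B =====
-- the inner `while stack and stack[-1] < ch and removed < allowed` loop of Source B
def popLoopB (stack : List Char) (removed : Int) (ch : Char) (allowed : Int) :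
    List Char × Int :=
  if h : stack.getLast?.any (fun t => decide (t < ch)) = true ∧ removed < allowed then
    popLoopB stack.dropLast (removed + 1) ch allowed
  else (stack, removed)
termination_by stack.length
decreasing_by
  cases stack with
  | nil => simp at h
  | cons a l => simp [List.length_dropLast]

def part2_alt (input : String) : Int :=
  ((PySem.Str.split? input "\n").getD []).foldl (fun total line =>
    if line.toList = [] then total
    else
      let cs := line.toList
      let allowed : Int := (cs.length : Int) - 12
      let st := cs.foldl (fun (st : List Char × Int) ch =>
          let p := popLoopB st.1 st.2 ch allowed
          (p.1 ++ [ch], p.2)) ([], 0)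
      total + (PySem.Int.ofChars? (PySem.Chars.zfill (PySem.List.slice st.1 none (some 12)) 12)).getD 0) 0

-- ===== PRECONDITION & SPEC =====
-- Pre_ excludes exactly the inputs where A raises: any line containing a non-digit
-- character makes `int(bank[j])` raise ValueError.
def Pre_part2 (input : String) : Prop :=
  (((PySem.Str.split? input "\n").getD []).all
    (fun bank => bank.toList.all PySem.Chars.isdigit)) = true
instance (input : String) : Decidable (Pre_part2 input) := by unfold Pre_part2; infer_instance

def pvWitness_part2 : String := "31415926535\n27"

def Spec_part2 (input : String) (out : Int) : Prop := out = part2_alt input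
instance (input : String) (out : Int) : Decidable (Spec_part2 input out) := by
  unfold Spec_part2; infer_instance

-- ===== CLAIM (what is proved, stated in full; the proofs are below) =====
def Claim_equal_part2 : Prop :=
  ∀ (input : String), Dom_part2 input → Pre_part2 input → Spec_part2 input (part2 input)

-- ===== LEMMAS AND PROOFS =====

-- ---- proof-side definitions ----

-- digit value of one character, as A computes it
def d1 (c : Char) : Int := (PySem.Int.ofChars? [c]).getD 0

-- running maximum used by the specs (A picks a new battery exactly when strictly larger)
def mxf (a c : Char) : Char := if a < c then c else a
def mxl (a : Char) (l : List Char) : Char := l.foldl mxf a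

-- window of A's pass with r later passes remaining, scanning from absolute index `start`
def winA (cs : List Char) (r start : Nat) : List Char :=
  (cs.drop start).take (cs.length - r - start)

-- character-level model of A's 12 passes (quirk kept: `start` does not advance on max '0')
def AR (cs : List Char) : Nat → Nat → List Char
  | 0, _ => []
  | r+1, start =>
    let w := winA cs r start
    let m := mxl '0' w
    m :: AR cs r (if m = '0' then start else start + w.idxOf m + 1)

def ARs (cs : List Char) : Nat → Nat → Nat
  | 0, start => start
  | r+1, start =>
    let w := winA cs r start
    let m := mxl '0' w
    ARs cs r (if m = '0' then start else start + w.idxOf m + 1)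

-- canonical greedy pick of k characters (the common spec both programs meet)
def G : Nat → List Char → List Char
  | 0, _ => []
  | k+1, s =>
    let w := s.take (s.length - k)
    let m := mxl '0' w
    m :: G k (s.drop (w.idxOf m + 1))

-- B's pop loop / stack run, stack reversed (head = top), budget = pops still allowed
def spopC : List Char → Nat → Char → List Char × Nat
  | [], b, _ => ([], b)
  | x :: st, 0, _ => (x :: st, 0)
  | x :: st, b+1, c => if x < c then spopC st b c else (x :: st, b+1)

def srunC : List Char → List Char → Nat → List Char × Nat
  | [], st, b => (st, b)
  | c :: cs, st, b => srunC cs (c :: (spopC st b c).1) (spopC st b c).2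

def AllDig (l : List Char) : Prop := ∀ c ∈ l, PySem.Chars.isdigit c = true

-- ---- character lemmas ----

theorem digit_cases {c : Char} (h : PySem.Chars.isdigit c = true) :
    c = '0' ∨ c = '1' ∨ c = '2' ∨ c = '3' ∨ c = '4' ∨ c = '5' ∨ c = '6' ∨ c = '7' ∨ c = '8' ∨ c = '9' := by
  simp only [PySem.Chars.isdigit, Bool.and_eq_true, decide_eq_true_eq] at h
  obtain ⟨h1, h2⟩ := h
  rw [Char.le_def, UInt32.le_iff_toNat_le] at h1 h2
  have e1 : ('0' : Char).val.toNat = 48 := rfl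
  have e2 : ('9' : Char).val.toNat = 57 := rfl
  rw [e1] at h1; rw [e2] at h2
  have hc : Char.ofNat c.toNat = c := Char.ofNat_toNat c
  have ht : c.toNat = c.val.toNat := rfl
  have hn : c.val.toNat = 48 ∨ c.val.toNat = 49 ∨ c.val.toNat = 50 ∨ c.val.toNat = 51 ∨ c.val.toNat = 52 ∨ c.val.toNat = 53 ∨ c.val.toNat = 54 ∨ c.val.toNat = 55 ∨ c.val.toNat = 56 ∨ c.val.toNat = 57 := by omega
  rcases hn with h|h|h|h|h|h|h|h|h|h <;> rw [← hc, ht, h] <;> decide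

theorem toChars_d1 {c : Char} (h : PySem.Chars.isdigit c = true) :
    PySem.Int.toChars (d1 c) = [c] := by
  rcases digit_cases h with h|h|h|h|h|h|h|h|h|h <;> subst h <;> decide

theorem d1_lt_iff {a b : Char} (ha : PySem.Chars.isdigit a = true)
    (hb : PySem.Chars.isdigit b = true) : (d1 b < d1 a ↔ b < a) := by
  rcases digit_cases ha with h|h|h|h|h|h|h|h|h|h <;> subst h <;>
    rcases digit_cases hb with h|h|h|h|h|h|h|h|h|h <;> subst h <;> decide

theorem digit_zero_le {c : Char} (h : PySem.Chars.isdigit c = true) : '0' ≤ c := by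
  simp only [PySem.Chars.isdigit, Bool.and_eq_true, decide_eq_true_eq] at h
  exact h.1

-- ---- running-max lemmas ----

theorem mxl_mem_cons (a : Char) (l : List Char) : mxl a l = a ∨ mxl a l ∈ l := by
  induction l generalizing a with
  | nil => left; rfl
  | cons c l ih =>
    rcases ih (mxf a c) with h | h
    · rw [mxl, List.foldl_cons, ← mxl] at *
      rw [h]; unfold mxf; split
      · right; simp
      · left; rfl
    · right; rw [mxl, List.foldl_cons, ← mxl]; simp [h]

theorem le_mxl (a : Char) (l : List Char) : a ≤ mxl a l ∧ ∀ x ∈ l, x ≤ mxl a l := by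
  induction l generalizing a with
  | nil => exact ⟨le_refl _, by simp⟩
  | cons c l ih =>
    obtain ⟨h1, h2⟩ := ih (mxf a c)
    have ha : a ≤ mxf a c := by unfold mxf; split <;> [exact le_of_lt ‹_›; exact le_refl _]
    have hc : c ≤ mxf a c := by unfold mxf; split <;> [exact le_refl _; exact le_of_not_gt ‹_›]
    refine ⟨le_trans ha h1, ?_⟩
    intro x hx
    rcases List.mem_cons.mp hx with rfl | hx
    · exact le_trans hc h1
    · exact h2 x hx

theorem mxl_cons (a c : Char) (l : List Char) : mxl a (c :: l) = mxl (mxf a c) l := rfl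

theorem mem_take_idxOf_ne {m x : Char} {l : List Char} (h : x ∈ l.take (l.idxOf m)) : x ≠ m := by
  induction l with
  | nil => simp at h
  | cons y l ih =>
    by_cases hy : y = m
    · simp [hy] at h
    · rw [List.idxOf_cons_ne _ (by simpa using hy), List.take_succ_cons] at h
      rcases List.mem_cons.mp h with rfl | h
      · exact hy
      · exact ih h

theorem mxl_zero_append {z w : List Char} (hz : ∀ c ∈ z, c = '0') :
    mxl '0' (z ++ w) = mxl '0' w := by
  induction z with
  | nil => rfl
  | cons c z ih =>
    have hc : c = '0' := hz c (by simp)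
    subst hc
    rw [List.cons_append, mxl, List.foldl_cons]
    have : mxf '0' '0' = '0' := by decide
    rw [this, ← mxl]
    exact ih (fun c hc => hz c (by simp [hc]))

theorem mxl_mem_digits {l : List Char} (hl : l ≠ []) (hd : AllDig l) :
    mxl '0' l ∈ l := by
  rcases mxl_mem_cons '0' l with h | h
  · cases l with
    | nil => exact absurd rfl hl
    | cons c l =>
      have h1 : c ≤ mxl '0' (c :: l) := (le_mxl '0' (c :: l)).2 c (by simp)
      have h2 : '0' ≤ c := digit_zero_le (hd c (by simp))
      rw [h] at h1
      have hc0 : c = '0' := le_antisymm h1 h2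
      rw [h, hc0]
      simp
  · exact h

theorem mxl_zero_all_zero {l : List Char} (hd : AllDig l) (h : mxl '0' l = '0') :
    ∀ x ∈ l, x = '0' := by
  intro x hx
  have h1 : x ≤ mxl '0' l := (le_mxl '0' l).2 x hx
  rw [h] at h1
  exact le_antisymm h1 (digit_zero_le (hd x hx))

-- ---- A port ↔ AR ----

theorem innerA (cs : List Char) (hd : AllDig cs) :
    ∀ (w start : Nat), start + w ≤ cs.length →
    ∀ (bs : List Int) (cur : Char), PySem.Chars.isdigit cur = true → ∀ (p : Int),
    ((PySem.List.pyRange (start : Int) ((start : Int) + (w : Int))).foldl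
      (fun (st2 : List Int × Int) j =>
        if dvalA cs j > (PySem.List.pyGet? st2.1 (-1)).getD 0 then
          (st2.1.dropLast ++ [dvalA cs j], j)
        else st2)
      (bs ++ [d1 cur], p)) =
    (bs ++ [d1 (mxl cur ((cs.drop start).take w))],
      if mxl cur ((cs.drop start).take w) = cur then p
      else ((start + ((cs.drop start).take w).idxOf (mxl cur ((cs.drop start).take w)) : Nat) : Int)) := by
  intro w
  induction w with
  | zero =>
    intro start hsw bs cur hcur p
    rw [show ((0:Nat):Int) = (0:Int) from rfl, add_zero,
      PySem.List.pyRange_one_eq_nil (le_refl _)]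
    simp [mxl]
  | succ w ihw =>
    intro start hsw bs cur hcur p
    have hslt : start < cs.length := by omega
    have hcd : PySem.Chars.isdigit cs[start] = true := hd _ (List.getElem_mem _)
    have hcons : cs.drop start = cs[start] :: cs.drop (start+1) := List.drop_eq_getElem_cons hslt
    have hW : (cs.drop start).take (w+1) = cs[start] :: (cs.drop (start+1)).take w := by
      rw [hcons, List.take_succ_cons]
    have hrange : PySem.List.pyRange (start:Int) ((start:Int) + ((w+1 : Nat) : Int)) =
        (start:Int) :: PySem.List.pyRange ((start:Int)+1) ((start:Int) + ((w+1:Nat):Int)) :=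
      PySem.List.pyRange_one_cons (by omega)
    rw [hrange, List.foldl_cons]
    have hdv : dvalA cs ((start:Nat):Int) = d1 (cs[start]) := by
      unfold dvalA
      rw [PySem.List.pyGet?_natCast, List.getElem?_eq_getElem hslt]
      rfl
    simp only [hdv, PySem.List.pyGet?_neg_one_append_singleton, Option.getD_some]
    have harr : (start:Int) + ((w+1:Nat):Int) = (((start+1 : Nat)):Int) + ((w:Nat):Int) := by
      push_cast; omega
    rw [hW, mxl_cons]
    by_cases hlt : cur < cs[start]
    · rw [if_pos ((d1_lt_iff hcd hcur).mpr hlt), List.dropLast_concat, harr,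
        show ((start:Int) + 1) = (((start+1:Nat)):Int) by push_cast; ring,
        ihw (start+1) (by omega) bs cs[start] hcd ((start:Nat):Int)]
      have hmxf : mxf cur cs[start] = cs[start] := by rw [mxf, if_pos hlt]
      rw [hmxf]
      have hcm : cs[start] ≤ mxl cs[start] ((cs.drop (start+1)).take w) :=
        (le_mxl cs[start] ((cs.drop (start+1)).take w)).1
      have hmcur : mxl cs[start] ((cs.drop (start+1)).take w) ≠ cur :=
        ne_of_gt (lt_of_lt_of_le hlt hcm)
      rw [if_neg hmcur]
      by_cases hmc : mxl cs[start] ((cs.drop (start+1)).take w) = cs[start]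
      · rw [if_pos hmc, hmc, List.idxOf_cons_self]
        simp
      · rw [if_neg hmc, List.idxOf_cons_ne _ (Ne.symm hmc)]
        congr 1
        push_cast
        omega
    · rw [if_neg (fun hcon => hlt ((d1_lt_iff hcd hcur).mp hcon)), harr,
        show ((start:Int) + 1) = (((start+1:Nat)):Int) by push_cast; ring,
        ihw (start+1) (by omega) bs cur hcur p]
      have hmxf : mxf cur cs[start] = cur := by rw [mxf, if_neg hlt]
      rw [hmxf]
      by_cases hmc : mxl cur ((cs.drop (start+1)).take w) = cur
      · rw [if_pos hmc, if_pos hmc]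
      · rw [if_neg hmc, if_neg hmc]
        have hcur_lt : cur < mxl cur ((cs.drop (start+1)).take w) :=
          lt_of_le_of_ne (le_mxl cur _).1 (Ne.symm hmc)
        have hcne : cs[start] ≠ mxl cur ((cs.drop (start+1)).take w) :=
          ne_of_lt (lt_of_le_of_lt (le_of_not_gt hlt) hcur_lt)
        rw [List.idxOf_cons_ne _ hcne]
        congr 1
        push_cast
        omega

theorem outerA (cs : List Char) (hd : AllDig cs) :
    ∀ (r : Nat), r ≤ 12 → ∀ (bs : List Int) (start : Nat), start ≤ cs.length →
    ((PySem.List.pyRange (12 - (r : Int)) 12).foldl (fun (st : List Int × Int) i =>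
        (PySem.List.pyRange (st.2 + 1) ((cs.length : Int) - 11 + i)).foldl
          (fun (st2 : List Int × Int) j =>
            if dvalA cs j > (PySem.List.pyGet? st2.1 (-1)).getD 0 then
              (st2.1.dropLast ++ [dvalA cs j], j)
            else st2)
          (st.1 ++ [0], st.2)) (bs, (start : Int) - 1)) =
    (bs ++ (AR cs r start).map d1, ((ARs cs r start : Nat) : Int) - 1) := by
  intro r
  induction r with
  | zero =>
    intro _ bs start hstart
    rw [show (12 - ((0:Nat):Int)) = (12:Int) by norm_num,
      PySem.List.pyRange_one_eq_nil (le_refl _)]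
    simp [AR, ARs]
  | succ r ihr =>
    intro hr bs start hstart
    rw [PySem.List.pyRange_one_cons (a := 12 - ((r+1:Nat):Int)) (by omega),
      List.foldl_cons]
    rw [show (12 - ((r+1:Nat):Int) + 1) = 12 - ((r:Nat):Int) by push_cast; ring]
    simp only
    rw [show ((start:Int) - 1 + 1) = (start:Int) by ring]
    rw [show ((cs.length:Int) - 11 + (12 - ((r+1:Nat):Int))) = (cs.length:Int) - (r:Int) by
      push_cast; ring]
    rcases Nat.lt_or_ge cs.length (start + r) with hcase | hcase
    · -- empty window: bound < start
      rw [PySem.List.pyRange_one_eq_nil (by omega), List.foldl_nil]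
      have hwe : winA cs r start = [] := by
        rw [winA, show cs.length - r - start = 0 by omega]
        simp
      rw [ihr (by omega) (bs ++ [0]) start hstart]
      simp only [AR, ARs, hwe]
      simp [show mxl '0' ([]:List Char) = '0' from rfl, show d1 '0' = (0:Int) by decide]
    · -- real window of length w
      have hw : (cs.length:Int) - (r:Int) = (start:Int) + ((cs.length - r - start : Nat) : Int) := by
        omega
      rw [hw]
      have hinner := innerA cs hd (cs.length - r - start) start (by omega) bs '0' (by decide)
        ((start:Int) - 1)
      rw [show d1 '0' = (0:Int) from by decide] at hinner
      rw [hinner]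
      have hwinA : winA cs r start = (cs.drop start).take (cs.length - r - start) := rfl
      by_cases hm : mxl '0' ((cs.drop start).take (cs.length - r - start)) = '0'
      · rw [if_pos hm, ihr (by omega) _ start hstart]
        simp only [AR, ARs, hwinA]
        rw [if_pos hm]
        simp
      · rw [if_neg hm]
        have hmem : mxl '0' ((cs.drop start).take (cs.length - r - start)) ∈
            (cs.drop start).take (cs.length - r - start) := by
          rcases mxl_mem_cons '0' ((cs.drop start).take (cs.length - r - start)) with h | h
          · exact absurd h hm
          · exact h
        have hidx : ((cs.drop start).take (cs.length - r - start)).idxOf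
            (mxl '0' ((cs.drop start).take (cs.length - r - start))) < cs.length - r - start := by
          have h1 := List.idxOf_lt_length_of_mem hmem
          have h2 : ((cs.drop start).take (cs.length - r - start)).length =
              cs.length - r - start := by
            simp [List.length_take, List.length_drop]
            omega
          omega
        set i := ((cs.drop start).take (cs.length - r - start)).idxOf
            (mxl '0' ((cs.drop start).take (cs.length - r - start))) with hi
        rw [show ((start + i : Nat) : Int) = ((start + i + 1 : Nat) : Int) - 1 by push_cast; ring,
          ihr (by omega) _ (start + i + 1) (by omega)]
        simp only [AR, ARs, hwinA]
        rw [if_neg hm, ← hi]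
        simp

-- ---- AR = padding ++ G ----

theorem AR_digits (cs : List Char) (hd : AllDig cs) :
    ∀ r start, AllDig (AR cs r start) := by
  intro r
  induction r with
  | zero => intro start c hc; simp [AR] at hc
  | succ r ih =>
    intro start c hc
    rw [AR] at hc
    rcases List.mem_cons.mp hc with rfl | hc
    · rcases mxl_mem_cons '0' (winA cs r start) with h | h
      · rw [h]; decide
      · exact hd _ (List.mem_of_mem_drop (List.mem_of_mem_take h))
    · exact ih _ c hc

theorem AR_eq_G (cs : List Char) (hd : AllDig cs) :
    ∀ (r : Nat) (z s : List Char) (start : Nat), start ≤ cs.length →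
      cs.drop start = z ++ s → (∀ c ∈ z, c = '0') → r ≤ s.length →
      AR cs r start = G r s := by
  intro r
  induction r with
  | zero => intro z s start _ _ _ _; rfl
  | succ r ih =>
    intro z s start hstart hzs hz hr
    have hsd : AllDig s := fun c hc => hd c (List.mem_of_mem_drop (hzs ▸ List.mem_append_right z hc))
    have hlen : cs.length - start = z.length + s.length := by
      have := congrArg List.length hzs
      simp only [List.length_drop, List.length_append] at this
      omega
    have hwin : winA cs r start = z ++ s.take (s.length - r) := by
      rw [winA, hzs]
      have h1 : cs.length - r - start = z.length + (s.length - r) := by omega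
      rw [h1, List.take_append, List.take_of_length_le (by omega)]
      congr 1
      congr 1
      omega
    have hwsl : (s.take (s.length - r)).length = s.length - r := by simp
    have hwsne : s.take (s.length - r) ≠ [] := by
      apply List.ne_nil_of_length_pos
      rw [hwsl]; omega
    have hwsd : AllDig (s.take (s.length - r)) := fun c hc => hsd c (List.mem_of_mem_take hc)
    have hm : mxl '0' (winA cs r start) = mxl '0' (s.take (s.length - r)) := by
      rw [hwin, mxl_zero_append hz]
    rw [AR, G]
    simp only [hm]
    by_cases h0 : mxl '0' (s.take (s.length - r)) = '0'
    · -- stuck pass: the window is all zeros, start does not advance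
      cases s with
      | nil => simp at hr
      | cons a t =>
        have ha : a = '0' := by
          have hmem : a ∈ (a :: t).take ((a :: t).length - r) := by
            have : (a :: t).length - r = (t.length - r) + 1 := by simp at hr ⊢; omega
            rw [this, List.take_succ_cons]
            simp
          exact mxl_zero_all_zero hwsd h0 a hmem
        have hidx : ((a :: t).take ((a :: t).length - r)).idxOf (mxl '0' ((a :: t).take ((a :: t).length - r))) = 0 := by
          rw [h0]
          have : (a :: t).length - r = (t.length - r) + 1 := by simp at hr ⊢; omega
          rw [this, List.take_succ_cons, ha, List.idxOf_cons_self]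
        rw [if_pos h0, hidx]
        simp only [List.drop_succ_cons, List.drop_zero]
        congr 1
        exact ih (z ++ ['0']) t start hstart
          (by rw [hzs, ha]; simp)
          (by intro c hc; rcases List.mem_append.mp hc with h | h
              · exact hz c h
              · simpa using h)
          (by simp at hr; omega)
    · -- advancing pass
      rw [if_neg h0]
      have hmem : mxl '0' (s.take (s.length - r)) ∈ s.take (s.length - r) :=
        mxl_mem_digits hwsne hwsd
      have hnotz : mxl '0' (s.take (s.length - r)) ∉ z := by
        intro hin
        exact h0 (hz _ hin)
      have hidx : (winA cs r start).idxOf (mxl '0' (s.take (s.length - r))) =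
          z.length + (s.take (s.length - r)).idxOf (mxl '0' (s.take (s.length - r))) := by
        rw [hwin, List.idxOf_append, if_neg hnotz]
        omega
      set i := (s.take (s.length - r)).idxOf (mxl '0' (s.take (s.length - r))) with hi
      have hiw : i < s.length - r := by
        rw [← hwsl]
        exact List.idxOf_lt_length_of_mem hmem
      congr 1
      rw [hidx]
      exact ih [] (s.drop (i+1)) (start + (z.length + i) + 1)
        (by omega)
        (by rw [show start + (z.length + i) + 1 = start + (z.length + i + 1) by omega,
              ← List.drop_drop, hzs, List.drop_append]
            rw [List.drop_eq_nil_of_le (by omega), List.nil_append]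
            congr 1
            omega)
        (by simp)
        (by simp; omega)

theorem G_full (s : List Char) (hd : AllDig s) : G s.length s = s := by
  induction s with
  | nil => rfl
  | cons c t ih =>
    rw [List.length_cons, G]
    have h1 : (c :: t).length - t.length = 1 := by simp
    rw [h1]
    have h2 : (c :: t).take 1 = [c] := by simp
    rw [h2]
    have hc : '0' ≤ c := digit_zero_le (hd c (by simp))
    have hm : mxl '0' [c] = c := by
      show mxf '0' c = c
      unfold mxf
      rcases lt_or_eq_of_le hc with h | h
      · rw [if_pos h]
      · rw [← h]; simp
    rw [hm, List.idxOf_cons_self]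
    simp only [List.drop_succ_cons, List.drop_zero]
    rw [ih (fun x hx => hd x (by simp [hx]))]

theorem AR_pad (cs : List Char) (hd : AllDig cs) :
    ∀ r, cs.length ≤ r → AR cs r 0 = List.replicate (r - cs.length) '0' ++ cs := by
  intro r
  induction r with
  | zero =>
    intro h
    have : cs = [] := List.eq_nil_of_length_eq_zero (by omega)
    subst this
    rfl
  | succ r ih =>
    intro h
    rcases Nat.lt_or_ge r cs.length with hlt | hge
    · -- cs.length = r + 1 : every pass has a window, AR = G = cs
      have he : cs.length = r + 1 := by omega
      have h1 : AR cs (r+1) 0 = G (r+1) cs :=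
        AR_eq_G cs hd (r+1) [] cs 0 (by omega) (by simp) (by simp) (by omega)
      rw [h1, ← he, G_full cs hd, he]
      simp
    · -- empty window: a zero battery is emitted and the state is unchanged
      have hwe : winA cs r 0 = [] := by
        rw [winA]
        have : cs.length - r - 0 = 0 := by omega
        rw [this]
        simp
      rw [AR]
      simp only [hwe]
      have hm : mxl '0' ([] : List Char) = '0' := rfl
      rw [hm, if_pos rfl, ih hge]
      have : r + 1 - cs.length = (r - cs.length) + 1 := by omega
      rw [this, List.replicate_succ]
      simp

-- ---- B port ↔ srunC ----

theorem spop_suffix (ch : Char) : ∀ (st : List Char) (b : Nat),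
    ∃ q, q ≤ b ∧ q ≤ st.length ∧ spopC st b ch = (st.drop q, b - q) := by
  intro st
  induction st with
  | nil => intro b; exact ⟨0, by simp [spopC]⟩
  | cons x st ih =>
    intro b
    cases b with
    | zero => exact ⟨0, by simp [spopC]⟩
    | succ b =>
      by_cases hx : x < ch
      · obtain ⟨q, hq1, hq2, hq3⟩ := ih b
        exact ⟨q + 1, by omega, by simp; omega, by simp [spopC, hx, hq3]⟩
      · exact ⟨0, by simp [spopC, hx]⟩

theorem pop_bridge (ch : Char) (allowed : Int) : ∀ (stack : List Char) (removed : Int),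
    0 ≤ removed → removed ≤ allowed →
    popLoopB stack removed ch allowed =
      ((spopC stack.reverse (allowed - removed).toNat ch).1.reverse,
        allowed - ((spopC stack.reverse (allowed - removed).toNat ch).2 : Int)) := by
  intro stack
  induction stack using List.reverseRecOn with
  | nil =>
    intro removed h0 hle
    rw [popLoopB]
    simp [spopC]
    omega
  | append_singleton st x ih =>
    intro removed h0 hle
    rw [popLoopB, List.reverse_append]
    simp only [List.reverse_cons, List.reverse_nil, List.nil_append, List.singleton_append]
    by_cases hx : x < ch
    · by_cases hr : removed < allowed
      · have hb : (allowed - removed).toNat = ((allowed - (removed+1)).toNat) + 1 := by omega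
        rw [dif_pos ⟨by simp [hx], hr⟩, List.dropLast_concat]
        rw [hb, spopC, if_pos hx]
        exact ih (removed + 1) (by omega) (by omega)
      · have hb : (allowed - removed).toNat = 0 := by omega
        rw [dif_neg (by simp [hr])]
        rw [hb, spopC]
        simp
        omega
    · rw [dif_neg]
      · cases hb : (allowed - removed).toNat with
        | zero => rw [spopC]; simp; omega
        | succ b => rw [spopC, if_neg hx]; simp; omega
      · simp [hx]

theorem fold_bridge (allowed : Int) (h0 : 0 ≤ allowed) : ∀ (cs : List Char) (stack : List Char) (removed : Int),
    0 ≤ removed → removed ≤ allowed →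
    cs.foldl (fun (st : List Char × Int) ch =>
        (((popLoopB st.1 st.2 ch allowed)).1 ++ [ch], (popLoopB st.1 st.2 ch allowed).2))
      (stack, removed) =
    ((srunC cs stack.reverse (allowed - removed).toNat).1.reverse,
      allowed - ((srunC cs stack.reverse (allowed - removed).toNat).2 : Int)) := by
  intro cs
  induction cs with
  | nil =>
    intro stack removed h1 h2
    simp [srunC]
    omega
  | cons c cs ih =>
    intro stack removed h1 h2
    rw [List.foldl_cons, srunC]
    obtain ⟨q, hq1, hq2, hq3⟩ := spop_suffix c stack.reverse (allowed - removed).toNat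
    rw [pop_bridge c allowed stack removed h1 h2]
    have h3 : (0 : Int) ≤ allowed - ((spopC stack.reverse (allowed - removed).toNat c).2 : Int) := by
      rw [hq3]; omega
    have h4 : allowed - ((spopC stack.reverse (allowed - removed).toNat c).2 : Int) ≤ allowed := by
      rw [hq3]; omega
    have := ih ((spopC stack.reverse (allowed - removed).toNat c).1.reverse ++ [c])
      (allowed - ((spopC stack.reverse (allowed - removed).toNat c).2 : Int)) h3 h4
    rw [this]
    have h5 : (allowed - (allowed - ((spopC stack.reverse (allowed - removed).toNat c).2 : Int))).toNat
        = (spopC stack.reverse (allowed - removed).toNat c).2 := by omega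
    rw [h5]
    simp

theorem fold_nopop (allowed : Int) (h0 : allowed ≤ 0) : ∀ (cs : List Char) (stack : List Char),
    cs.foldl (fun (st : List Char × Int) ch =>
        (((popLoopB st.1 st.2 ch allowed)).1 ++ [ch], (popLoopB st.1 st.2 ch allowed).2))
      (stack, 0) = (stack ++ cs, 0) := by
  intro cs
  induction cs with
  | nil => intro stack; simp
  | cons c cs ih =>
    intro stack
    rw [List.foldl_cons]
    have hp : popLoopB stack 0 c allowed = (stack, 0) := by
      rw [popLoopB, dif_neg]
      rintro ⟨-, h2⟩
      omega
    simp only [hp]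
    rw [ih (stack ++ [c])]
    simp

-- ---- srunC = G ----

theorem spop_all {m : Char} : ∀ (st : List Char) (b : Nat), (∀ x ∈ st, x < m) → st.length ≤ b →
    spopC st b m = ([], b - st.length) := by
  intro st
  induction st with
  | nil => intro b _ _; simp [spopC]
  | cons x st ih =>
    intro b hall hb
    cases b with
    | zero => simp at hb
    | succ b =>
      have hx : x < m := hall x (by simp)
      rw [spopC, if_pos hx, ih b (fun y hy => hall y (by simp [hy])) (by simp at hb; omega)]
      congr 1
      simp only [List.length_cons]
      omega

theorem srun_len : ∀ (cs st : List Char) (b : Nat),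
    (srunC cs st b).1.length + (b - (srunC cs st b).2) = st.length + cs.length ∧
      (srunC cs st b).2 ≤ b := by
  intro cs
  induction cs with
  | nil => intro st b; simp [srunC]
  | cons c cs ih =>
    intro st b
    rw [srunC]
    obtain ⟨q, hq1, hq2, hq3⟩ := spop_suffix c st b
    obtain ⟨ha, hb⟩ := ih (c :: (spopC st b c).1) (spopC st b c).2
    rw [hq3] at ha hb ⊢
    simp only [List.length_cons, List.length_drop] at ha hb ⊢
    refine ⟨?_, ?_⟩ <;> omega

theorem srun_ramp {m : Char} : ∀ (pre st : List Char) (b : Nat) (rest : List Char),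
    (∀ x ∈ pre, x < m) → (∀ x ∈ st, x < m) → st.length + pre.length ≤ b →
    srunC (pre ++ m :: rest) st b = srunC rest [m] (b - (st.length + pre.length)) := by
  intro pre
  induction pre with
  | nil =>
    intro st b rest hpre hst hb
    rw [List.nil_append, srunC]
    rw [spop_all st b hst (by simpa using hb)]
    simp
  | cons p pre ih =>
    intro st b rest hpre hst hb
    rw [List.cons_append, srunC]
    obtain ⟨q, hq1, hq2, hq3⟩ := spop_suffix p st b
    rw [hq3]
    have hst' : ∀ x ∈ p :: st.drop q, x < m := by
      intro x hx
      rcases List.mem_cons.mp hx with rfl | hx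
      · exact hpre x (by simp)
      · exact hst x (List.mem_of_mem_drop hx)
    have hb' : (p :: st.drop q).length + pre.length ≤ b - q := by
      simp only [List.length_cons, List.length_drop]
      simp only [List.length_cons] at hb
      omega
    rw [ih (p :: st.drop q) (b - q) rest (fun x hx => hpre x (by simp [hx])) hst' hb']
    congr 1
    simp only [List.length_cons, List.length_drop]
    simp only [List.length_cons] at hb
    omega

theorem spop_protect {m c : Char} : ∀ {st : List Char} {b : Nat}, (m < c → b ≤ st.length) →
    spopC (st ++ [m]) b c = ((spopC st b c).1 ++ [m], (spopC st b c).2) := by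
  intro st
  induction st with
  | nil =>
    intro b h
    cases b with
    | zero => simp [spopC]
    | succ b =>
      have hm : ¬ m < c := fun hm => by simpa using h hm
      simp [spopC, hm]
  | cons x st ih =>
    intro b h
    cases b with
    | zero => simp [spopC]
    | succ b =>
      rw [List.cons_append, spopC, spopC]
      by_cases hx : x < c
      · rw [if_pos hx, if_pos hx]
        exact ih (fun hm => by have := h hm; simp at this ⊢; omega)
      · rw [if_neg hx, if_neg hx]
        simp

theorem srun_protect {m : Char} : ∀ (cs st : List Char) (b : Nat),
    (∀ j, (hj : j < cs.length) → m < cs[j] → b ≤ st.length + j) →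
    srunC cs (st ++ [m]) b = ((srunC cs st b).1 ++ [m], (srunC cs st b).2) := by
  intro cs
  induction cs with
  | nil => intro st b h; simp [srunC]
  | cons c cs ih =>
    intro st b h
    rw [srunC, srunC]
    obtain ⟨q, hq1, hq2, hq3⟩ := spop_suffix c st b
    rw [spop_protect (fun hm => by simpa using h 0 (by simp) (by simpa using hm))]
    rw [hq3]
    have := ih (c :: (st.drop q)) (b - q)
      (fun j hj hmj => by
        have := h (j+1) (by simpa using hj) (by simpa using hmj)
        simp only [List.length_cons, List.length_drop]
        omega)
    rw [← List.cons_append, this]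

theorem srun_eq_G : ∀ (k : Nat) (s : List Char), AllDig s → k ≤ s.length →
    (srunC s [] (s.length - k)).1.reverse.take k = G k s := by
  intro k
  induction k with
  | zero => intro s _ _; simp [G]
  | succ k ih =>
    intro s hd hk
    have hwl : (s.take (s.length - k)).length = s.length - k := by
      simp [List.length_take]
    set w := s.take (s.length - k) with hw
    have hwne : w ≠ [] := by
      apply List.ne_nil_of_length_pos
      rw [hwl]; omega
    have hwd : AllDig w := fun c hc => hd c (List.mem_of_mem_take hc)
    set m := mxl '0' w with hm
    have hmem : m ∈ w := mxl_mem_digits hwne hwd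
    set i := w.idxOf m with hi
    have hiw : i < w.length := List.idxOf_lt_length_of_mem hmem
    have hik : i < s.length - k := by rw [← hwl]; exact hiw
    have hiS : i < s.length := by omega
    have hsi : s[i] = m := by
      have h1 : w[i]'hiw = m := List.getElem_idxOf hiw
      simp only [hw, List.getElem_take] at h1
      exact h1
    have hsplit : s = s.take i ++ m :: s.drop (i+1) := by
      conv_lhs => rw [← List.take_append_drop i s]
      rw [List.drop_eq_getElem_cons hiS, hsi]
    have hpre : ∀ x ∈ s.take i, x < m := by
      intro x hx
      have hxw : x ∈ w.take i := by
        rw [hw, List.take_take, min_eq_left (le_of_lt hik)]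
        exact hx
      have hne : x ≠ m := mem_take_idxOf_ne (by rw [hi] at hxw; exact hxw)
      have hle : x ≤ m := (le_mxl '0' w).2 x (List.mem_of_mem_take hxw)
      exact lt_of_le_of_ne hle hne
    have hpl : (s.take i).length = i := by simp [List.length_take]; omega
    have h1 : srunC s [] (s.length - (k+1)) =
        srunC (s.drop (i+1)) [m] ((s.length - (k+1)) - i) := by
      have h0 : srunC s [] (s.length - (k+1)) =
          srunC (s.take i ++ m :: s.drop (i+1)) [] (s.length - (k+1)) := by rw [← hsplit]
      rw [h0, srun_ramp (s.take i) [] (s.length - (k+1)) (s.drop (i+1)) hpre (by simp)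
        (by simp [hpl]; omega)]
      congr 1
      simp [hpl]
    have h2 : srunC (s.drop (i+1)) [m] ((s.length - (k+1)) - i) =
        ((srunC (s.drop (i+1)) [] ((s.length - (k+1)) - i)).1 ++ [m],
          (srunC (s.drop (i+1)) [] ((s.length - (k+1)) - i)).2) := by
      have := srun_protect (s.drop (i+1)) [] ((s.length - (k+1)) - i) (fun j hj hmj => by
        have hjv : (s.drop (i+1))[j] = s[i+1+j]'(by simp at hj ⊢; omega) := List.getElem_drop
        rw [hjv] at hmj
        by_cases hcase : i+1+j < s.length - k
        · exfalso
          have hmemw : s[i+1+j]'(by omega) ∈ w := by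
            rw [hw]
            have : (s.take (s.length - k))[i+1+j]'(by rw [hwl]; omega) = s[i+1+j]'(by omega) :=
              List.getElem_take
            rw [← this]
            exact List.getElem_mem _
          exact absurd hmj (not_lt.mpr ((le_mxl '0' w).2 _ hmemw))
        · simp only [List.length_nil, Nat.zero_add]
          omega)
      simpa using this
    rw [h1, h2]
    simp only [List.reverse_append, List.reverse_cons, List.reverse_nil, List.nil_append,
      List.singleton_append, List.take_succ_cons]
    have hrd : AllDig (s.drop (i+1)) := fun c hc => hd c (List.mem_of_mem_drop hc)
    have hrk : k ≤ (s.drop (i+1)).length := by simp; omega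
    have hb : (s.drop (i+1)).length - k = (s.length - (k+1)) - i := by simp; omega
    rw [← hb, ih (s.drop (i+1)) hrd hrk]
    show _ = G (k+1) s
    rw [G]

-- ---- per-line assembly ----

theorem join_digits {l : List Char} (hd : AllDig l) :
    PySem.Chars.join [] ((l.map d1).map PySem.Int.toChars) = l := by
  rw [List.map_map]
  have : l.map (PySem.Int.toChars ∘ d1) = l.map (fun c => [c]) :=
    List.map_congr_left (fun c hc => toChars_d1 (hd c hc))
  rw [this, PySem.Chars.join_nil_singletons]

theorem zfill_digits {l : List Char} (hd : AllDig l) (hne : l ≠ []) :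
    PySem.Chars.zfill l 12 = List.replicate (12 - l.length) '0' ++ l := by
  cases Nat.lt_or_ge l.length 12 with
  | inr hge =>
    rw [PySem.Chars.zfill.eq_def, if_pos (by exact_mod_cast hge)]
    rw [show 12 - l.length = 0 by omega]
    simp
  | inl hlt =>
    rw [PySem.Chars.zfill.eq_def, if_neg (by omega)]
    cases l with
    | nil => exact absurd rfl hne
    | cons c rest =>
      have hcd := hd c (by simp)
      have hsign : ¬ (c = '+' ∨ c = '-') := by
        rcases digit_cases hcd with h|h|h|h|h|h|h|h|h|h <;> subst h <;> decide
      dsimp only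
      rw [if_neg hsign]
      congr 1

theorem line_eq (bank : String) (hd : AllDig bank.toList) (total : Int) :
    (let cs := bank.toList
     let st :=
      (PySem.List.pyRange 0 12).foldl (fun (st : List Int × Int) i =>
        (PySem.List.pyRange (st.2 + 1) ((cs.length : Int) - 11 + i)).foldl
          (fun (st2 : List Int × Int) j =>
            if dvalA cs j > (PySem.List.pyGet? st2.1 (-1)).getD 0 then
              (st2.1.dropLast ++ [dvalA cs j], j)
            else st2)
          (st.1 ++ [0], st.2)) ([], -1)
     total + (PySem.Int.ofChars? (PySem.Chars.join [] (st.1.map PySem.Int.toChars))).getD 0) =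
    (if bank.toList = [] then total
     else
      let cs := bank.toList
      let allowed : Int := (cs.length : Int) - 12
      let st := cs.foldl (fun (st : List Char × Int) ch =>
          (((popLoopB st.1 st.2 ch allowed)).1 ++ [ch], (popLoopB st.1 st.2 ch allowed).2)) ([], 0)
      total + (PySem.Int.ofChars? (PySem.Chars.zfill (PySem.List.slice st.1 none (some 12)) 12)).getD 0) := by
  dsimp only
  have hA : ((PySem.List.pyRange 0 12).foldl (fun (st : List Int × Int) i =>
        (PySem.List.pyRange (st.2 + 1) ((bank.toList.length : Int) - 11 + i)).foldl
          (fun (st2 : List Int × Int) j =>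
            if dvalA bank.toList j > (PySem.List.pyGet? st2.1 (-1)).getD 0 then
              (st2.1.dropLast ++ [dvalA bank.toList j], j)
            else st2)
          (st.1 ++ [0], st.2)) ([], -1)) =
      (([] : List Int) ++ (AR bank.toList 12 0).map d1,
        ((ARs bank.toList 12 0 : Nat) : Int) - 1) := by
    have h0 := outerA bank.toList hd 12 (le_refl _) [] 0 (Nat.zero_le _)
    rw [show (12 - ((12:Nat):Int)) = (0:Int) by norm_num] at h0
    rw [show ((0:Nat):Int) - 1 = (-1 : Int) by norm_num] at h0
    exact h0
  rw [hA]
  simp only [List.nil_append]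
  rw [join_digits (AR_digits bank.toList hd 12 0)]
  by_cases hnil : bank.toList = []
  · rw [if_pos hnil]
    rw [AR_pad bank.toList hd 12 (by rw [hnil]; simp)]
    rw [hnil]
    norm_num
    decide
  · rw [if_neg hnil]
    rcases Nat.lt_or_ge bank.toList.length 12 with hlt | hge
    · -- short line: no removals are allowed, the stack is the whole line
      rw [fold_nopop ((bank.toList.length : Int) - 12) (by omega) bank.toList []]
      simp only [List.nil_append]
      rw [PySem.List.slice_to bank.toList (b := 12) (by norm_num)]
      rw [show ((12:Int)).toNat = 12 from rfl]
      rw [List.take_of_length_le (by omega)]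
      rw [zfill_digits hd hnil]
      rw [AR_pad bank.toList hd 12 (by omega)]
    · -- long line: the monotonic stack computes the greedy selection
      have hb := fold_bridge ((bank.toList.length : Int) - 12) (by omega)
        bank.toList [] 0 (le_refl _) (by omega)
      rw [show ((bank.toList.length : Int) - 12 - 0) = (bank.toList.length : Int) - 12 by ring] at hb
      rw [show (((bank.toList.length : Int) - 12)).toNat = bank.toList.length - 12 by omega] at hb
      simp only [List.reverse_nil] at hb
      rw [hb]
      simp only
      rw [PySem.List.slice_to _ (b := 12) (by norm_num),
        show ((12:Int)).toNat = 12 from rfl]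
      have hG : (srunC bank.toList [] (bank.toList.length - 12)).1.reverse.take 12 =
          G 12 bank.toList := srun_eq_G 12 bank.toList hd hge
      rw [hG]
      have hAR : AR bank.toList 12 0 = G 12 bank.toList :=
        AR_eq_G bank.toList hd 12 [] bank.toList 0 (Nat.zero_le _) (by simp) (by simp) hge
      rw [hAR]
      -- zfill is the identity on the 12 selected characters
      have hlen12 : (G 12 bank.toList).length = 12 := by
        rw [← hG]
        obtain ⟨hl, hb2⟩ := srun_len bank.toList [] (bank.toList.length - 12)
        simp only [List.length_nil, Nat.zero_add] at hl
        rw [List.length_take, List.length_reverse]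
        omega
      rw [PySem.Chars.zfill.eq_def, if_pos (by rw [hlen12]; norm_num)]

-- ===== VERDICT (by name: the statement is the Claim_ definition above) =====
theorem part2_spec : Claim_equal_part2 := by
  intro input hdom hpre
  unfold Spec_part2 part2 part2_alt
  apply PySem.List.foldl_congr_mem
  intro total bank hmem
  have hd : AllDig bank.toList := by
    intro c hc
    have := hpre
    unfold Pre_part2 at this
    rw [List.all_eq_true] at this
    have h2 := this bank hmem
    rw [List.all_eq_true] at h2
    exact h2 c hc
  exact line_eq bank hd total
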